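-- pv_equiv track=rewrite | github.com/openairlabs/flyweel-agentic-seo-aeo-engine | core/ai_router.py | _build_brand_links_from_sitemap
-- ===== SOURCE A (Python) =====
-- from typing import Optional, Dict, Any, List, Callable
--
-- def _build_brand_links_from_sitemap(site_context: Optional[Dict[str, Any]]) -> str:
--     """Build brand link examples from real sitemap data
--
--     Args:
--         site_context: Site context with internal_links from live sitemap
--
--     Returns:
--         Formatted string with real brand links for prompt injection
--     """
--     if not site_context or 'internal_links' not in site_context:
--         # Absolute fallback - just homepage
--         return "- Brand → [Brand](https://acme.com)"
--
--     links = site_context['internal_links']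
--     brand_links = []
--
--     # 1. Homepage (highest priority)
--     homepage = links.get('Brand') or links.get('Home') or links.get('Visit Website') or 'https://acme.com'
--     brand_links.append(f"- Brand → [Brand]({homepage})")
--
--     # 2. Brand Methodology (look for blog post or dedicated page)
--     brand_methodology_link = None
--     for text, url in links.items():
--         if 'Brand Methodology' in url.lower():
--             brand_methodology_link = url
--             break
--     if brand_methodology_link:
--         brand_links.append(f"- Brand Methodology → [Brand Methodology]({brand_methodology_link})")
--
--     # 3. Integrations page
--     integrations = links.get('Integrations') or links.get('See CRM integrations') or links.get('Go to Integrations')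
--     if integrations:
--         brand_links.append(f"- Integrations → [integrations]({integrations})")
--
--     # 4. Pricing page
--     pricing = links.get('Pricing') or links.get('See Pricing')
--     if pricing:
--         brand_links.append(f"- Pricing → [pricing]({pricing})")
--
--     # 5. AI Agent page
--     ai_agent = links.get('AI Agent') or links.get('Learn About Our Agent')
--     if ai_agent:
--         brand_links.append(f"- AI Agent → [AI Agent]({ai_agent})")
--
--     # 6. Tools page
--     tools = links.get('Tools') or links.get('Access free tools for ads.')
--     if tools:
--         brand_links.append(f"- Tools → [tools]({tools})")
--
--     return '\n'.join(brand_links)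
-- ===== SOURCE B (Python) =====
-- def _build_brand_links_from_sitemap(site_context):
--     """Single-pass rebuild: one scan over links.items() dispatches each key through a
--     reverse index (key -> (slot, rank)) keeping the best-ranked url per slot, instead of
--     A's per-section fallback-chain lookups; also fixes A's dead case-sensitive
--     'Brand Methodology' scan by using a lowercase needle."""
--     if not site_context or 'internal_links' not in site_context:
--         return "- Brand → [Brand](https://acme.com)"
--     links = site_context['internal_links']
--
--     KEY_INDEX = {
--         'Brand': (0, 0), 'Home': (0, 1), 'Visit Website': (0, 2),
--         'Integrations': (1, 0), 'See CRM integrations': (1, 1), 'Go to Integrations': (1, 2),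
--         'Pricing': (2, 0), 'See Pricing': (2, 1),
--         'AI Agent': (3, 0), 'Learn About Our Agent': (3, 1),
--         'Tools': (4, 0), 'Access free tools for ads.': (4, 1),
--     }
--     best = [None] * 5          # slot -> (rank, url), minimal rank wins
--     meth = None
--     for key, url in links.items():
--         if meth is None and 'brand methodology' in url.lower():
--             meth = url
--         hit = KEY_INDEX.get(key)
--         if hit is not None and url:
--             s, r = hit
--             if best[s] is None or r < best[s][0]:
--                 best[s] = (r, url)
--
--     home = best[0][1] if best[0] is not None else 'https://acme.com'
--     lines = ["- Brand → [Brand]({})".format(home)]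
--     if meth is not None:
--         lines.append("- Brand Methodology → [Brand Methodology]({})".format(meth))
--     for slot, (label, disp) in enumerate([('Integrations', 'integrations'),
--                                           ('Pricing', 'pricing'),
--                                           ('AI Agent', 'AI Agent'),
--                                           ('Tools', 'tools')], start=1):
--         if best[slot] is not None:
--             lines.append("- {} → [{}]({})".format(label, disp, best[slot][1]))
--     return '\n'.join(lines)
-- ===== Notes on version B (the rewrite author's own statement) =====
-- stated objective: alternative
-- what changed: Replaces A's per-section get-or fallback chains (repeated dict lookups per candidate key) by a single pass over links.items() that dispatches each key through a reverse index key->(slot,rank) and keeps the minimal-rank url per slot, then emits the slots in order; the methodology scan is folded into the same pass with the lowercase needle so the case-insensitive match actually works.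
-- intended difference: On inputs whose internal_links contain a url with 'brand methodology' in its lowercased text, A omits the Brand Methodology line (its needle 'Brand Methodology' keeps capitals, so it can never occur in url.lower()), while B appends '- Brand Methodology → [Brand Methodology](url)' for the first such url, which is what the dead branch evidently intends. — e.g. on _build_brand_links_from_sitemap(some [("internal_links", [("x", "Brand Methodology")])]): A returns "- Brand → [Brand](https://acme.com)", B returns "- Brand → [Brand](https://acme.com)\n- Brand Methodology → [Brand Methodology](Brand Methodology)"
import Mathlib
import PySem

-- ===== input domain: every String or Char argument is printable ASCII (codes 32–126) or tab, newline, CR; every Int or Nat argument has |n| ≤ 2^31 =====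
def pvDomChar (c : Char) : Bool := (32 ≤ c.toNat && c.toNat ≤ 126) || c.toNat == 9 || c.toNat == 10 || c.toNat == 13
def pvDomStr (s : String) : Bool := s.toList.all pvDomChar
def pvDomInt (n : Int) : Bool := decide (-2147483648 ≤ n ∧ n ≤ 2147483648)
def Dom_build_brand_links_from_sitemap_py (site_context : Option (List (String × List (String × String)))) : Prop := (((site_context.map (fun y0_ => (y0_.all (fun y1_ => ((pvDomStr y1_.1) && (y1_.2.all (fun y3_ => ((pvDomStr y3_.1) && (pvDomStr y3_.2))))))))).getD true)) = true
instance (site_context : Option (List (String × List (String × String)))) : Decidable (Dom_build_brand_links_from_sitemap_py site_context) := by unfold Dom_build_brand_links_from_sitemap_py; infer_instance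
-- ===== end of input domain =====

-- B replaces A's per-section get-or fallback chains by ONE pass over links.items() with a
-- reverse index key→(slot,rank) keeping the minimal-rank url per slot, and fixes A's dead
-- case-sensitive 'Brand Methodology' scan (objective: alternative).

-- ===== PORT A =====
-- Python's `for text, url in links.items(): if 'Brand Methodology' in url.lower(): … break`
def pyA_findMeth : List (String × String) → Option String
  | [] => none
  | (_, url) :: rest =>
    if PySem.Str.isIn "Brand Methodology" (PySem.Str.lower url) = true then some url
    else pyA_findMeth rest

def build_brand_links_from_sitemap_py (site_context : Option (List (String × List (String × String)))) : String :=
  match site_context with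
  | none => "- Brand → [Brand](https://acme.com)"
  | some l =>
    let d := PySem.Dict.ofList l
    if l.isEmpty || !(d.contains "internal_links") then
      "- Brand → [Brand](https://acme.com)"
    else
      let links := PySem.Dict.ofList (d.getD "internal_links" [])
      -- homepage = links.get('Brand') or links.get('Home') or links.get('Visit Website') or 'https://acme.com'
      let homepage :=
        if links.getD "Brand" "" ≠ "" then links.getD "Brand" ""
        else if links.getD "Home" "" ≠ "" then links.getD "Home" ""
        else if links.getD "Visit Website" "" ≠ "" then links.getD "Visit Website" ""
        else "https://acme.com"
      let brand_links := ["- Brand → [Brand](" ++ homepage ++ ")"]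
      let brand_links :=
        match pyA_findMeth links.items with
        | some u => brand_links ++ ["- Brand Methodology → [Brand Methodology](" ++ u ++ ")"]
        | none => brand_links
      let integrations :=
        if links.getD "Integrations" "" ≠ "" then links.getD "Integrations" ""
        else if links.getD "See CRM integrations" "" ≠ "" then links.getD "See CRM integrations" ""
        else links.getD "Go to Integrations" ""
      let brand_links :=
        if integrations ≠ "" then brand_links ++ ["- Integrations → [integrations](" ++ integrations ++ ")"]
        else brand_links
      let pricing :=
        if links.getD "Pricing" "" ≠ "" then links.getD "Pricing" "" else links.getD "See Pricing" ""
      let brand_links :=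
        if pricing ≠ "" then brand_links ++ ["- Pricing → [pricing](" ++ pricing ++ ")"]
        else brand_links
      let ai_agent :=
        if links.getD "AI Agent" "" ≠ "" then links.getD "AI Agent" "" else links.getD "Learn About Our Agent" ""
      let brand_links :=
        if ai_agent ≠ "" then brand_links ++ ["- AI Agent → [AI Agent](" ++ ai_agent ++ ")"]
        else brand_links
      let tools :=
        if links.getD "Tools" "" ≠ "" then links.getD "Tools" "" else links.getD "Access free tools for ads." ""
      let brand_links :=
        if tools ≠ "" then brand_links ++ ["- Tools → [tools](" ++ tools ++ ")"]
        else brand_links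
      PySem.Str.join "\n" brand_links

-- ===== PORT B =====
-- KEY_INDEX.get(key): the reverse index  candidate key → (slot, rank)
def pvKeyIndex (k : String) : Option (Nat × Nat) :=
  if k = "Brand" then some (0, 0) else if k = "Home" then some (0, 1) else if k = "Visit Website" then some (0, 2)
  else if k = "Integrations" then some (1, 0) else if k = "See CRM integrations" then some (1, 1) else if k = "Go to Integrations" then some (1, 2)
  else if k = "Pricing" then some (2, 0) else if k = "See Pricing" then some (2, 1)
  else if k = "AI Agent" then some (3, 0) else if k = "Learn About Our Agent" then some (3, 1)
  else if k = "Tools" then some (4, 0) else if k = "Access free tools for ads." then some (4, 1)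
  else none

-- `if best[s] is None or r < best[s][0]: best[s] = (r, url)`
def pvUpd (b : Option (Nat × String)) (r : Nat) (url : String) : Option (Nat × String) :=
  match b with
  | none => some (r, url)
  | some (r0, u0) => if r < r0 then some (r, url) else some (r0, u0)

-- the loop state: meth plus best[0..4]
structure pvSt where
  meth : Option String
  b0 : Option (Nat × String)
  b1 : Option (Nat × String)
  b2 : Option (Nat × String)
  b3 : Option (Nat × String)
  b4 : Option (Nat × String)
deriving Repr, DecidableEq

def pvSetSlot (st : pvSt) (s : Nat) (r : Nat) (url : String) : pvSt :=
  match s with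
  | 0 => { st with b0 := pvUpd st.b0 r url }
  | 1 => { st with b1 := pvUpd st.b1 r url }
  | 2 => { st with b2 := pvUpd st.b2 r url }
  | 3 => { st with b3 := pvUpd st.b3 r url }
  | _ => { st with b4 := pvUpd st.b4 r url }

def pvGetSlot (st : pvSt) (s : Nat) : Option (Nat × String) :=
  match s with
  | 0 => st.b0
  | 1 => st.b1
  | 2 => st.b2
  | 3 => st.b3
  | _ => st.b4

-- `if meth is None and 'brand methodology' in url.lower(): meth = url`
def pvMethUpd (st : pvSt) (kv : String × String) : pvSt :=
  if st.meth = none ∧ PySem.Str.isIn "brand methodology" (PySem.Str.lower kv.2) = true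
  then { st with meth := some kv.2 } else st

-- `hit = KEY_INDEX.get(key); if hit is not None and url: …`
def pvDispatch (st : pvSt) (kv : String × String) : pvSt :=
  match pvKeyIndex kv.1 with
  | some (s, r) => if kv.2 ≠ "" then pvSetSlot st s r kv.2 else st
  | none => st

def pvStep (st : pvSt) (kv : String × String) : pvSt :=
  pvDispatch (pvMethUpd st kv) kv

def pvInit : pvSt := ⟨none, none, none, none, none, none⟩

def pvTable : List (Nat × String × String) :=
  [(1, "Integrations", "integrations"), (2, "Pricing", "pricing"),
   (3, "AI Agent", "AI Agent"), (4, "Tools", "tools")]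

def build_brand_links_from_sitemap_py_alt (site_context : Option (List (String × List (String × String)))) : String :=
  match site_context with
  | none => "- Brand → [Brand](https://acme.com)"
  | some l =>
    let d := PySem.Dict.ofList l
    if l.isEmpty || !(d.contains "internal_links") then
      "- Brand → [Brand](https://acme.com)"
    else
      let links := PySem.Dict.ofList (d.getD "internal_links" [])
      let st := links.items.foldl pvStep pvInit
      let home := match st.b0 with | some (_, u) => u | none => "https://acme.com"
      let lines := ["- Brand → [Brand](" ++ home ++ ")"]
      let lines := lines ++
        (match st.meth with
         | some u => ["- Brand Methodology → [Brand Methodology](" ++ u ++ ")"]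
         | none => [])
      let lines := pvTable.foldl
        (fun acc t =>
          acc ++ (match pvGetSlot st t.1 with
                  | some (_, u) => ["- " ++ t.2.1 ++ " → [" ++ t.2.2 ++ "](" ++ u ++ ")"]
                  | none => [])) lines
      PySem.Str.join "\n" lines

-- ===== PRECONDITION & SPEC =====
-- On inputs whose internal_links contain a url with 'brand methodology' in its lowercased
-- text, A omits the Brand Methodology line (its needle 'Brand Methodology' keeps capitals,
-- so it can never occur in url.lower()), while B appends the line for the first such url,
-- which is what the dead branch evidently intends.
def D_build_brand_links_from_sitemap_py (site_context : Option (List (String × List (String × String)))) : Prop :=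
  (PySem.Dict.ofList (site_context.getD [])).contains "internal_links" = true ∧
  ((PySem.Dict.ofList ((PySem.Dict.ofList (site_context.getD [])).getD "internal_links" [])).values.any
    (fun u => PySem.Str.isIn "brand methodology" (PySem.Str.lower u))) = true
instance (site_context : Option (List (String × List (String × String)))) : Decidable (D_build_brand_links_from_sitemap_py site_context) := by unfold D_build_brand_links_from_sitemap_py; infer_instance

def Spec_build_brand_links_from_sitemap_py (site_context : Option (List (String × List (String × String)))) (out : String) : Prop := ¬ D_build_brand_links_from_sitemap_py site_context → out = build_brand_links_from_sitemap_py_alt site_context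
instance (site_context : Option (List (String × List (String × String)))) (out : String) : Decidable (Spec_build_brand_links_from_sitemap_py site_context out) := by unfold Spec_build_brand_links_from_sitemap_py; infer_instance

def pvDiffWitness_build_brand_links_from_sitemap_py : (Option (List (String × List (String × String)))) :=
  some [("internal_links", [("x", "Brand Methodology")])]
def pvDiffWitnessOut_build_brand_links_from_sitemap_py : String × String :=
  ("- Brand → [Brand](https://acme.com)",
   "- Brand → [Brand](https://acme.com)\n- Brand Methodology → [Brand Methodology](Brand Methodology)")

-- ===== CLAIM (what is proved, stated in full; the proofs are below) =====
def Claim_unchanged_build_brand_links_from_sitemap_py : Prop := ∀ (site_context : Option (List (String × List (String × String)))), Dom_build_brand_links_from_sitemap_py site_context → Spec_build_brand_links_from_sitemap_py site_context (build_brand_links_from_sitemap_py site_context)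
def Claim_changed_build_brand_links_from_sitemap_py : Prop := Dom_build_brand_links_from_sitemap_py (pvDiffWitness_build_brand_links_from_sitemap_py) ∧ D_build_brand_links_from_sitemap_py (pvDiffWitness_build_brand_links_from_sitemap_py) ∧ build_brand_links_from_sitemap_py (pvDiffWitness_build_brand_links_from_sitemap_py) = pvDiffWitnessOut_build_brand_links_from_sitemap_py.1 ∧ build_brand_links_from_sitemap_py_alt (pvDiffWitness_build_brand_links_from_sitemap_py) = pvDiffWitnessOut_build_brand_links_from_sitemap_py.2 ∧ pvDiffWitnessOut_build_brand_links_from_sitemap_py.1 ≠ pvDiffWitnessOut_build_brand_links_from_sitemap_py.2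
def Claim_exact_build_brand_links_from_sitemap_py : Prop := ∀ (site_context : Option (List (String × List (String × String)))), Dom_build_brand_links_from_sitemap_py site_context → D_build_brand_links_from_sitemap_py site_context → build_brand_links_from_sitemap_py site_context ≠ build_brand_links_from_sitemap_py_alt site_context

-- ===== LEMMAS AND PROOFS =====

-- ---- A's methodology scan never fires: 'B' survives lower() in the needle ----
theorem pv_lowerChar_ne_B (c : Char) : PySem.Chars.lowerChar c ≠ 'B' := by
  unfold PySem.Chars.lowerChar PySem.Chars.isupper
  split
  · rename_i h
    simp only [Bool.and_eq_true, decide_eq_true_eq] at h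
    obtain ⟨h1, h2⟩ := h
    rw [Char.le_def, UInt32.le_iff_toNat_le] at h1 h2
    rw [show ('A').val.toNat = 65 from rfl] at h1
    rw [show ('Z').val.toNat = 90 from rfl] at h2
    have h1' : 65 ≤ c.toNat := h1
    have h2' : c.toNat ≤ 90 := h2
    intro hEq
    have hv : (Char.ofNat (c.toNat + 32)).toNat = c.toNat + 32 := by
      unfold Char.ofNat
      rw [dif_pos (by constructor; omega)]
      simp only [Char.ofNatAux, Char.toNat, UInt32.toNat, BitVec.toNat_ofNatLT]
    rw [hEq] at hv
    rw [show ('B').toNat = 66 from rfl] at hv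
    omega
  · rename_i h
    simp only [Bool.and_eq_true, decide_eq_true_eq, not_and] at h
    intro hEq; subst hEq
    simp at h

theorem pvA_meth_none (items : List (String × String)) : pyA_findMeth items = none := by
  induction items with
  | nil => rfl
  | cons p rest ih =>
    obtain ⟨t, url⟩ := p
    unfold pyA_findMeth
    rw [if_neg, ih]
    intro hIn
    have hinf := (PySem.Str.isIn_iff_infix _ _).mp hIn
    have hB : 'B' ∈ (PySem.Str.lower url).toList :=
      hinf.subset (by decide : 'B' ∈ ("Brand Methodology" : String).toList)
    rw [PySem.Str.toList_lower] at hB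
    unfold PySem.Chars.lower at hB
    obtain ⟨c, _, hc⟩ := List.mem_map.mp hB
    exact pv_lowerChar_ne_B c hc

-- ---- projecting the single-pass fold to its six components ----
def pvStepM (m : Option String) (kv : String × String) : Option String :=
  if m = none ∧ PySem.Str.isIn "brand methodology" (PySem.Str.lower kv.2) = true
  then some kv.2 else m

def pvStepSlot (s : Nat) (b : Option (Nat × String)) (kv : String × String) : Option (Nat × String) :=
  match pvKeyIndex kv.1 with
  | some (s', r) => if s' = s ∧ kv.2 ≠ "" then pvUpd b r kv.2 else b
  | none => b

theorem pvSetSlot_meth (st : pvSt) (s r : Nat) (u : String) :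
    (pvSetSlot st s r u).meth = st.meth := by
  unfold pvSetSlot
  rcases s with _ | _ | _ | _ | s <;> rfl

theorem pvMethUpd_slot (st : pvSt) (kv : String × String) (s : Nat) :
    pvGetSlot (pvMethUpd st kv) s = pvGetSlot st s := by
  unfold pvMethUpd
  split_ifs
  · rcases s with _ | _ | _ | _ | s <;> rfl
  · rfl

theorem pvKeyIndex_none (k : String)
    (h1 : ¬ k = "Brand") (h2 : ¬ k = "Home") (h3 : ¬ k = "Visit Website")
    (h4 : ¬ k = "Integrations") (h5 : ¬ k = "See CRM integrations") (h6 : ¬ k = "Go to Integrations")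
    (h7 : ¬ k = "Pricing") (h8 : ¬ k = "See Pricing")
    (h9 : ¬ k = "AI Agent") (h10 : ¬ k = "Learn About Our Agent")
    (h11 : ¬ k = "Tools") (h12 : ¬ k = "Access free tools for ads.") :
    pvKeyIndex k = none := by
  unfold pvKeyIndex
  rw [if_neg h1, if_neg h2, if_neg h3, if_neg h4, if_neg h5, if_neg h6,
      if_neg h7, if_neg h8, if_neg h9, if_neg h10, if_neg h11, if_neg h12]

theorem pvKeyIndex_lt5 (k : String) (s r : Nat) (h : pvKeyIndex k = some (s, r)) : s < 5 := by
  by_cases h1 : k = "Brand"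
  · subst h1; rw [show pvKeyIndex "Brand" = some (0, 0) from by decide] at h
    injection h with h; injection h with ha hb; omega
  by_cases h2 : k = "Home"
  · subst h2; rw [show pvKeyIndex "Home" = some (0, 1) from by decide] at h
    injection h with h; injection h with ha hb; omega
  by_cases h3 : k = "Visit Website"
  · subst h3; rw [show pvKeyIndex "Visit Website" = some (0, 2) from by decide] at h
    injection h with h; injection h with ha hb; omega
  by_cases h4 : k = "Integrations"
  · subst h4; rw [show pvKeyIndex "Integrations" = some (1, 0) from by decide] at h
    injection h with h; injection h with ha hb; omega
  by_cases h5 : k = "See CRM integrations"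
  · subst h5; rw [show pvKeyIndex "See CRM integrations" = some (1, 1) from by decide] at h
    injection h with h; injection h with ha hb; omega
  by_cases h6 : k = "Go to Integrations"
  · subst h6; rw [show pvKeyIndex "Go to Integrations" = some (1, 2) from by decide] at h
    injection h with h; injection h with ha hb; omega
  by_cases h7 : k = "Pricing"
  · subst h7; rw [show pvKeyIndex "Pricing" = some (2, 0) from by decide] at h
    injection h with h; injection h with ha hb; omega
  by_cases h8 : k = "See Pricing"
  · subst h8; rw [show pvKeyIndex "See Pricing" = some (2, 1) from by decide] at h
    injection h with h; injection h with ha hb; omega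
  by_cases h9 : k = "AI Agent"
  · subst h9; rw [show pvKeyIndex "AI Agent" = some (3, 0) from by decide] at h
    injection h with h; injection h with ha hb; omega
  by_cases h10 : k = "Learn About Our Agent"
  · subst h10; rw [show pvKeyIndex "Learn About Our Agent" = some (3, 1) from by decide] at h
    injection h with h; injection h with ha hb; omega
  by_cases h11 : k = "Tools"
  · subst h11; rw [show pvKeyIndex "Tools" = some (4, 0) from by decide] at h
    injection h with h; injection h with ha hb; omega
  by_cases h12 : k = "Access free tools for ads."
  · subst h12; rw [show pvKeyIndex "Access free tools for ads." = some (4, 1) from by decide] at h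
    injection h with h; injection h with ha hb; omega
  rw [pvKeyIndex_none k h1 h2 h3 h4 h5 h6 h7 h8 h9 h10 h11 h12] at h
  exact absurd h (by simp)

theorem pvGetSlot_setSlot_eq (st : pvSt) (s r : Nat) (u : String) (hs : s < 5) :
    pvGetSlot (pvSetSlot st s r u) s = pvUpd (pvGetSlot st s) r u := by
  interval_cases s <;> rfl

theorem pvGetSlot_setSlot_ne (st : pvSt) (s s' r : Nat) (u : String)
    (hs : s < 5) (hs' : s' < 5) (hne : s' ≠ s) :
    pvGetSlot (pvSetSlot st s' r u) s = pvGetSlot st s := by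
  interval_cases s <;> interval_cases s' <;> (try rfl) <;> omega

theorem pvStep_meth (st : pvSt) (kv : String × String) :
    (pvStep st kv).meth = pvStepM st.meth kv := by
  have hd : (pvDispatch (pvMethUpd st kv) kv).meth = (pvMethUpd st kv).meth := by
    unfold pvDispatch
    split
    · split_ifs
      · exact pvSetSlot_meth _ _ _ _
      · rfl
    · rfl
  unfold pvStep
  rw [hd]
  unfold pvMethUpd pvStepM
  split_ifs <;> rfl

theorem pvStep_slot (st : pvSt) (kv : String × String) (s : Nat) (hs : s < 5) :
    pvGetSlot (pvStep st kv) s = pvStepSlot s (pvGetSlot st s) kv := by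
  unfold pvStep pvDispatch pvStepSlot
  split
  · rename_i s' r hk
    have hs' : s' < 5 := pvKeyIndex_lt5 kv.1 s' r hk
    by_cases hv : kv.2 ≠ ""
    · by_cases hss : s' = s
      · subst hss
        rw [if_pos hv, if_pos ⟨rfl, hv⟩, pvGetSlot_setSlot_eq _ _ _ _ hs, pvMethUpd_slot]
      · rw [if_pos hv, if_neg (by tauto), pvGetSlot_setSlot_ne _ _ _ _ _ hs hs' hss, pvMethUpd_slot]
    · rw [if_neg hv, if_neg (by tauto), pvMethUpd_slot]
  · exact pvMethUpd_slot st kv s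

theorem pvFold_meth (xs : List (String × String)) (st : pvSt) :
    (xs.foldl pvStep st).meth = xs.foldl pvStepM st.meth := by
  induction xs generalizing st with
  | nil => rfl
  | cons kv t ih => simp only [List.foldl_cons, ih, pvStep_meth]

theorem pvFold_slot (xs : List (String × String)) (st : pvSt) (s : Nat) (hs : s < 5) :
    pvGetSlot (xs.foldl pvStep st) s = xs.foldl (pvStepSlot s) (pvGetSlot st s) := by
  induction xs generalizing st with
  | nil => rfl
  | cons kv t ih => simp only [List.foldl_cons, ih, pvStep_slot st kv s hs]

-- ---- the meth component is the first lowercased match ----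
theorem pvFoldM_none (xs : List (String × String))
    (h : (xs.map Prod.snd).any (fun u => PySem.Str.isIn "brand methodology" (PySem.Str.lower u)) = false) :
    xs.foldl pvStepM none = none := by
  induction xs with
  | nil => rfl
  | cons kv t ih =>
    simp only [List.map_cons, List.any_cons, Bool.or_eq_false_iff] at h
    simp only [List.foldl_cons]
    rw [show pvStepM none kv = none by unfold pvStepM; rw [if_neg (by rw [h.1]; simp)]]
    exact ih h.2

theorem pvFoldM_some_of_some (xs : List (String × String)) (u : String) :
    xs.foldl pvStepM (some u) = some u := by
  induction xs with
  | nil => rfl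
  | cons kv t ih =>
    simp only [List.foldl_cons]
    rw [show pvStepM (some u) kv = some u by unfold pvStepM; rw [if_neg (by simp)]]
    exact ih

theorem pvFoldM_some (xs : List (String × String))
    (h : (xs.map Prod.snd).any (fun u => PySem.Str.isIn "brand methodology" (PySem.Str.lower u)) = true) :
    ∃ u, xs.foldl pvStepM none = some u := by
  induction xs with
  | nil => simp at h
  | cons kv t ih =>
    by_cases hu : PySem.Str.isIn "brand methodology" (PySem.Str.lower kv.2) = true
    · exact ⟨kv.2, by
        simp only [List.foldl_cons]
        rw [show pvStepM none kv = some kv.2 by unfold pvStepM; rw [if_pos ⟨rfl, hu⟩]]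
        exact pvFoldM_some_of_some t kv.2⟩
    · simp only [List.map_cons, List.any_cons, Bool.or_eq_true] at h
      obtain ⟨v, hv⟩ := ih (h.resolve_left hu)
      exact ⟨v, by
        simp only [List.foldl_cons]
        rw [show pvStepM none kv = none by
          unfold pvStepM
          rw [if_neg (by simp only [Bool.not_eq_true] at hu; rw [hu]; simp)]]
        exact hv⟩

-- ---- association-list lookup, and Dict.getD as that lookup ----
def pvLk : List (String × String) → String → String
  | [], _ => ""
  | (k, v) :: t, x => if k = x then v else pvLk t x

theorem pvGetD_eq_pvLk (d : PySem.Dict String String) (k : String) :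
    d.getD k "" = pvLk d.items k := by
  show (PySem.Dict.mk d.items).getD k "" = pvLk d.items k
  induction d.items with
  | nil => rfl
  | cons p t ih =>
    obtain ⟨k', v⟩ := p
    rw [PySem.Dict.getD_eq_get?_getD, PySem.Dict.get?_mk_cons]
    by_cases h : k' = k
    · simp [pvLk, h]
    · show ((if (k' == k) = true then some v else (PySem.Dict.mk t).get? k).getD "") =
        (if k' = k then v else pvLk t k)
      rw [if_neg (by simpa using h), if_neg h, ← PySem.Dict.getD_eq_get?_getD]
      exact ih

theorem pvLk_not_mem (xs : List (String × String)) (k : String)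
    (h : k ∉ xs.map Prod.fst) : pvLk xs k = "" := by
  induction xs with
  | nil => rfl
  | cons p t ih =>
    simp only [List.map_cons, List.mem_cons, not_or] at h
    obtain ⟨k', v⟩ := p
    show (if k' = k then v else pvLk t k) = ""
    rw [if_neg (fun hh => h.1 hh.symm)]
    exact ih h.2

-- ---- merge: folding the per-slot step from any start ----
def pvMerge (b c : Option (Nat × String)) : Option (Nat × String) :=
  match c with
  | none => b
  | some (r', u') =>
    match b with
    | none => some (r', u')
    | some (r, u) => if r' < r then some (r', u') else some (r, u)

theorem pvMerge_none_left (c : Option (Nat × String)) : pvMerge none c = c := by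
  rcases c with _ | ⟨r, u⟩ <;> rfl

theorem pvStepSlot_merge (s : Nat) (b : Option (Nat × String)) (kv : String × String) :
    pvStepSlot s b kv = pvMerge b (pvStepSlot s none kv) := by
  unfold pvStepSlot
  cases hk : pvKeyIndex kv.1 with
  | none => rcases b with _ | ⟨r0, u0⟩ <;> rfl
  | some p =>
    obtain ⟨s', r⟩ := p
    show (if s' = s ∧ kv.2 ≠ "" then pvUpd b r kv.2 else b) =
      pvMerge b (if s' = s ∧ kv.2 ≠ "" then pvUpd none r kv.2 else none)
    by_cases h : s' = s ∧ kv.2 ≠ ""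
    · rw [if_pos h, if_pos h]
      rcases b with _ | ⟨r0, u0⟩ <;> simp [pvUpd, pvMerge]
    · rw [if_neg h, if_neg h]
      rcases b with _ | ⟨r0, u0⟩ <;> rfl

theorem pvMerge_assoc (a b c : Option (Nat × String)) :
    pvMerge (pvMerge a b) c = pvMerge a (pvMerge b c) := by
  rcases a with _ | ⟨ra, ua⟩ <;> rcases b with _ | ⟨rb, ub⟩ <;> rcases c with _ | ⟨rc, uc⟩
  case none.none.none => rfl
  case none.none.some => rfl
  case none.some.none => rfl
  case none.some.some => exact (pvMerge_none_left _).symm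
  case some.none.none => rfl
  case some.none.some => rfl
  case some.some.none => rfl
  show pvMerge (if rb < ra then some (rb, ub) else some (ra, ua)) (some (rc, uc)) =
    pvMerge (some (ra, ua)) (if rc < rb then some (rc, uc) else some (rb, ub))
  rw [apply_ite (fun x => pvMerge x (some (rc, uc))),
      apply_ite (fun x => pvMerge (some (ra, ua)) x)]
  simp only [pvMerge]
  split_ifs <;> first | rfl | (exfalso; omega)

theorem pvFoldSlot_merge (s : Nat) (xs : List (String × String)) (b : Option (Nat × String)) :
    xs.foldl (pvStepSlot s) b = pvMerge b (xs.foldl (pvStepSlot s) none) := by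
  induction xs generalizing b with
  | nil => rfl
  | cons kv t ih =>
    simp only [List.foldl_cons]
    rw [ih (pvStepSlot s b kv), pvStepSlot_merge, pvMerge_assoc, ← ih (pvStepSlot s none kv)]

-- ---- the rank chain: what a slot's fold computes, as A's fallback chain ----
def pvChain : List String → Nat → List (String × String) → Option (Nat × String)
  | [], _, _ => none
  | c :: cs, r, xs => if pvLk xs c ≠ "" then some (r, pvLk xs c) else pvChain cs (r + 1) xs

def pvIdx : String → List String → Option Nat
  | _, [] => none
  | k, c :: cs => if k = c then some 0 else (pvIdx k cs).map (· + 1)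

-- pvKeyIndex restricted to slot s, as a position in a candidate list
def pvSlotHit (s : Nat) (k : String) : Option Nat :=
  match pvKeyIndex k with
  | some (s', r) => if s' = s then some r else none
  | none => none

theorem pvStepSlot_hit (s : Nat) (b : Option (Nat × String)) (kv : String × String) :
    pvStepSlot s b kv =
      match pvSlotHit s kv.1 with
      | some r => if kv.2 ≠ "" then pvUpd b r kv.2 else b
      | none => b := by
  unfold pvStepSlot pvSlotHit
  cases hk : pvKeyIndex kv.1 with
  | none => rfl
  | some p =>
    obtain ⟨s', r⟩ := p
    show (if s' = s ∧ kv.2 ≠ "" then pvUpd b r kv.2 else b) =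
      (match (if s' = s then some r else none : Option Nat) with
       | some r => if kv.2 ≠ "" then pvUpd b r kv.2 else b
       | none => b)
    by_cases hss : s' = s
    · rw [if_pos hss]
      by_cases hv : kv.2 ≠ ""
      · rw [if_pos ⟨hss, hv⟩]
        show pvUpd b r kv.2 = (if kv.2 ≠ "" then pvUpd b r kv.2 else b)
        rw [if_pos hv]
      · rw [if_neg (by tauto)]
        show b = (if kv.2 ≠ "" then pvUpd b r kv.2 else b)
        rw [if_neg hv]
    · rw [if_neg (by tauto), if_neg hss]

theorem pvChain_nil (cs : List String) (r : Nat) : pvChain cs r [] = none := by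
  induction cs generalizing r with
  | nil => rfl
  | cons c t ih => simp [pvChain, pvLk, ih]

theorem pvChain_rank_ge (cs : List String) (r0 : Nat) (xs : List (String × String))
    (r : Nat) (u : String) (h : pvChain cs r0 xs = some (r, u)) : r0 ≤ r := by
  induction cs generalizing r0 with
  | nil => simp [pvChain] at h
  | cons c t ih =>
    rw [pvChain] at h
    split_ifs at h with hc
    · cases h; rfl
    · exact Nat.le_of_succ_le (ih (r0 + 1) h)

theorem pvChain_congr (cs : List String) (r : Nat) (xs ys : List (String × String))
    (h : ∀ c ∈ cs, pvLk xs c = pvLk ys c) : pvChain cs r xs = pvChain cs r ys := by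
  induction cs generalizing r with
  | nil => rfl
  | cons c t ih =>
    rw [pvChain, pvChain, h c (List.mem_cons_self),
      ih (r + 1) (fun c hc => h c (List.mem_cons_of_mem _ hc))]

theorem pvIdx_none_not_mem (k : String) (cs : List String) (h : pvIdx k cs = none) : k ∉ cs := by
  induction cs with
  | nil => simp
  | cons c t ih =>
    simp only [pvIdx] at h
    split_ifs at h with hc
    rcases hx : pvIdx k t with _ | j
    · simp only [List.mem_cons, not_or]
      exact ⟨hc, ih hx⟩
    · rw [hx] at h
      exact absurd h (by simp)

theorem pvChain_cons_not_mem (cs : List String) (r : Nat) (k v : String)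
    (t : List (String × String)) (h : k ∉ cs) :
    pvChain cs r ((k, v) :: t) = pvChain cs r t := by
  apply pvChain_congr
  intro c hc
  show (if k = c then v else pvLk t c) = pvLk t c
  rw [if_neg (by intro hh; subst hh; exact h hc)]

theorem pvMerge_chain (cs : List String) (r0 j : Nat) (k v : String)
    (t : List (String × String)) (hj : pvIdx k cs = some j) (hkt : k ∉ t.map Prod.fst)
    (hv : v ≠ "") :
    pvMerge (some (r0 + j, v)) (pvChain cs r0 t) = pvChain cs r0 ((k, v) :: t) := by
  induction cs generalizing r0 j with
  | nil => cases hj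
  | cons c cs' ih =>
    simp only [pvIdx] at hj
    split_ifs at hj with hc
    · cases hj
      subst hc
      have h1 : pvLk ((k, v) :: t) k = v := by
        show (if k = k then v else pvLk t k) = v
        rw [if_pos rfl]
      have h2 : pvLk t k = "" := pvLk_not_mem t k hkt
      simp only [pvChain, h1, h2]
      rw [if_pos hv, if_neg (by simp)]
      cases hch : pvChain cs' (r0 + 1) t with
      | none => simp [pvMerge]
      | some p =>
        obtain ⟨r, u⟩ := p
        have := pvChain_rank_ge cs' (r0 + 1) t r u hch
        simp only [pvMerge, Nat.add_zero]
        rw [if_neg (by omega)]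
    · simp only [Option.map_eq_some_iff] at hj
      obtain ⟨j', hj', rfl⟩ := hj
      have hlkc : pvLk ((k, v) :: t) c = pvLk t c := by
        show (if k = c then v else pvLk t c) = pvLk t c
        rw [if_neg hc]
      simp only [pvChain, hlkc]
      by_cases hlc : pvLk t c ≠ ""
      · rw [if_pos hlc, if_pos hlc]
        simp only [pvMerge]
        rw [if_pos (by omega)]
      · rw [if_neg hlc, if_neg hlc, show r0 + (j' + 1) = (r0 + 1) + j' by omega]
        exact ih (r0 + 1) j' hj'

theorem pvSel_eq_chain (s : Nat) (cs : List String)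
    (hcs : ∀ k, pvSlotHit s k = pvIdx k cs)
    (xs : List (String × String)) (hnd : (xs.map Prod.fst).Nodup) :
    xs.foldl (pvStepSlot s) none = pvChain cs 0 xs := by
  induction xs with
  | nil => rw [pvChain_nil]; rfl
  | cons kv t ih =>
    obtain ⟨k, v⟩ := kv
    simp only [List.map_cons, List.nodup_cons] at hnd
    obtain ⟨hkt, hnd'⟩ := hnd
    simp only [List.foldl_cons]
    rw [pvFoldSlot_merge, ih hnd', pvStepSlot_hit, hcs]
    cases hj : pvIdx k cs with
    | none =>
      show pvMerge (match (none : Option Nat) with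
        | some r => if v ≠ "" then pvUpd none r v else none
        | none => none) (pvChain cs 0 t) = _
      rw [show (match (none : Option Nat) with
        | some r => if v ≠ "" then pvUpd none r v else none
        | none => (none : Option (Nat × String))) = none from rfl]
      rw [pvMerge_none_left, pvChain_cons_not_mem cs 0 k v t (pvIdx_none_not_mem k cs hj)]
    | some j =>
      by_cases hv : v ≠ ""
      · show pvMerge (if v ≠ "" then pvUpd none j v else none) (pvChain cs 0 t) = _
        rw [if_pos hv]
        rw [show pvUpd none j v = some (0 + j, v) from by simp [pvUpd]]
        exact pvMerge_chain cs 0 j k v t hj hkt hv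
      · show pvMerge (if v ≠ "" then pvUpd none j v else none) (pvChain cs 0 t) = _
        rw [if_neg hv, pvMerge_none_left]
        apply pvChain_congr
        intro c hc
        show pvLk t c = (if k = c then v else pvLk t c)
        by_cases hck : k = c
        · subst hck
          rw [if_pos rfl, pvLk_not_mem t k hkt]
          simpa using hv
        · rw [if_neg hck]

-- the five candidate lists, and that pvKeyIndex matches them
def pvC0 : List String := ["Brand", "Home", "Visit Website"]
def pvC1 : List String := ["Integrations", "See CRM integrations", "Go to Integrations"]
def pvC2 : List String := ["Pricing", "See Pricing"]
def pvC3 : List String := ["AI Agent", "Learn About Our Agent"]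
def pvC4 : List String := ["Tools", "Access free tools for ads."]
theorem pvHit0 (k : String) : pvSlotHit 0 k = pvIdx k pvC0 := by
  by_cases h1 : k = "Brand"
  · subst h1; decide
  by_cases h2 : k = "Home"
  · subst h2; decide
  by_cases h3 : k = "Visit Website"
  · subst h3; decide
  by_cases h4 : k = "Integrations"
  · subst h4; decide
  by_cases h5 : k = "See CRM integrations"
  · subst h5; decide
  by_cases h6 : k = "Go to Integrations"
  · subst h6; decide
  by_cases h7 : k = "Pricing"
  · subst h7; decide
  by_cases h8 : k = "See Pricing"
  · subst h8; decide
  by_cases h9 : k = "AI Agent"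
  · subst h9; decide
  by_cases h10 : k = "Learn About Our Agent"
  · subst h10; decide
  by_cases h11 : k = "Tools"
  · subst h11; decide
  by_cases h12 : k = "Access free tools for ads."
  · subst h12; decide
  unfold pvSlotHit
  rw [pvKeyIndex_none k h1 h2 h3 h4 h5 h6 h7 h8 h9 h10 h11 h12]
  unfold pvC0
  simp only [pvIdx]
  rw [if_neg h1, if_neg h2, if_neg h3]
  rfl

theorem pvHit1 (k : String) : pvSlotHit 1 k = pvIdx k pvC1 := by
  by_cases h1 : k = "Brand"
  · subst h1; decide
  by_cases h2 : k = "Home"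
  · subst h2; decide
  by_cases h3 : k = "Visit Website"
  · subst h3; decide
  by_cases h4 : k = "Integrations"
  · subst h4; decide
  by_cases h5 : k = "See CRM integrations"
  · subst h5; decide
  by_cases h6 : k = "Go to Integrations"
  · subst h6; decide
  by_cases h7 : k = "Pricing"
  · subst h7; decide
  by_cases h8 : k = "See Pricing"
  · subst h8; decide
  by_cases h9 : k = "AI Agent"
  · subst h9; decide
  by_cases h10 : k = "Learn About Our Agent"
  · subst h10; decide
  by_cases h11 : k = "Tools"
  · subst h11; decide
  by_cases h12 : k = "Access free tools for ads."
  · subst h12; decide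
  unfold pvSlotHit
  rw [pvKeyIndex_none k h1 h2 h3 h4 h5 h6 h7 h8 h9 h10 h11 h12]
  unfold pvC1
  simp only [pvIdx]
  rw [if_neg h4, if_neg h5, if_neg h6]
  rfl

theorem pvHit2 (k : String) : pvSlotHit 2 k = pvIdx k pvC2 := by
  by_cases h1 : k = "Brand"
  · subst h1; decide
  by_cases h2 : k = "Home"
  · subst h2; decide
  by_cases h3 : k = "Visit Website"
  · subst h3; decide
  by_cases h4 : k = "Integrations"
  · subst h4; decide
  by_cases h5 : k = "See CRM integrations"
  · subst h5; decide
  by_cases h6 : k = "Go to Integrations"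
  · subst h6; decide
  by_cases h7 : k = "Pricing"
  · subst h7; decide
  by_cases h8 : k = "See Pricing"
  · subst h8; decide
  by_cases h9 : k = "AI Agent"
  · subst h9; decide
  by_cases h10 : k = "Learn About Our Agent"
  · subst h10; decide
  by_cases h11 : k = "Tools"
  · subst h11; decide
  by_cases h12 : k = "Access free tools for ads."
  · subst h12; decide
  unfold pvSlotHit
  rw [pvKeyIndex_none k h1 h2 h3 h4 h5 h6 h7 h8 h9 h10 h11 h12]
  unfold pvC2
  simp only [pvIdx]
  rw [if_neg h7, if_neg h8]
  rfl

theorem pvHit3 (k : String) : pvSlotHit 3 k = pvIdx k pvC3 := by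
  by_cases h1 : k = "Brand"
  · subst h1; decide
  by_cases h2 : k = "Home"
  · subst h2; decide
  by_cases h3 : k = "Visit Website"
  · subst h3; decide
  by_cases h4 : k = "Integrations"
  · subst h4; decide
  by_cases h5 : k = "See CRM integrations"
  · subst h5; decide
  by_cases h6 : k = "Go to Integrations"
  · subst h6; decide
  by_cases h7 : k = "Pricing"
  · subst h7; decide
  by_cases h8 : k = "See Pricing"
  · subst h8; decide
  by_cases h9 : k = "AI Agent"
  · subst h9; decide
  by_cases h10 : k = "Learn About Our Agent"
  · subst h10; decide
  by_cases h11 : k = "Tools"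
  · subst h11; decide
  by_cases h12 : k = "Access free tools for ads."
  · subst h12; decide
  unfold pvSlotHit
  rw [pvKeyIndex_none k h1 h2 h3 h4 h5 h6 h7 h8 h9 h10 h11 h12]
  unfold pvC3
  simp only [pvIdx]
  rw [if_neg h9, if_neg h10]
  rfl

theorem pvHit4 (k : String) : pvSlotHit 4 k = pvIdx k pvC4 := by
  by_cases h1 : k = "Brand"
  · subst h1; decide
  by_cases h2 : k = "Home"
  · subst h2; decide
  by_cases h3 : k = "Visit Website"
  · subst h3; decide
  by_cases h4 : k = "Integrations"
  · subst h4; decide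
  by_cases h5 : k = "See CRM integrations"
  · subst h5; decide
  by_cases h6 : k = "Go to Integrations"
  · subst h6; decide
  by_cases h7 : k = "Pricing"
  · subst h7; decide
  by_cases h8 : k = "See Pricing"
  · subst h8; decide
  by_cases h9 : k = "AI Agent"
  · subst h9; decide
  by_cases h10 : k = "Learn About Our Agent"
  · subst h10; decide
  by_cases h11 : k = "Tools"
  · subst h11; decide
  by_cases h12 : k = "Access free tools for ads."
  · subst h12; decide
  unfold pvSlotHit
  rw [pvKeyIndex_none k h1 h2 h3 h4 h5 h6 h7 h8 h9 h10 h11 h12]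
  unfold pvC4
  simp only [pvIdx]
  rw [if_neg h11, if_neg h12]
  rfl

-- ---- turning chain results into A's value shapes ----
theorem pvChain3_val (c1 c2 c3 dflt : String) (xs : List (String × String)) :
    (match pvChain [c1, c2, c3] 0 xs with | some (_, u) => u | none => dflt) =
      (if pvLk xs c1 ≠ "" then pvLk xs c1
       else if pvLk xs c2 ≠ "" then pvLk xs c2
       else if pvLk xs c3 ≠ "" then pvLk xs c3
       else dflt) := by
  simp only [pvChain]
  split_ifs <;> rfl

theorem pvChain3_lines (c1 c2 c3 : String) (xs : List (String × String)) (f : String → List String) :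
    (match pvChain [c1, c2, c3] 0 xs with | some (_, u) => f u | none => []) =
      (if (if pvLk xs c1 ≠ "" then pvLk xs c1
           else if pvLk xs c2 ≠ "" then pvLk xs c2
           else pvLk xs c3) ≠ "" then
        f (if pvLk xs c1 ≠ "" then pvLk xs c1
           else if pvLk xs c2 ≠ "" then pvLk xs c2
           else pvLk xs c3)
      else []) := by
  simp only [pvChain]
  split_ifs <;> simp_all

theorem pvChain2_lines (c1 c2 : String) (xs : List (String × String)) (f : String → List String) :
    (match pvChain [c1, c2] 0 xs with | some (_, u) => f u | none => []) =
      (if (if pvLk xs c1 ≠ "" then pvLk xs c1 else pvLk xs c2) ≠ "" then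
        f (if pvLk xs c1 ≠ "" then pvLk xs c1 else pvLk xs c2)
      else []) := by
  simp only [pvChain]
  split_ifs <;> simp_all

theorem pv_append_ite_nil (x y : List String) (c : Prop) [Decidable c] :
    x ++ (if c then y else []) = if c then x ++ y else x := by
  split_ifs <;> simp

theorem pv_ite_cons (c : Prop) [Decidable c] (a : String) (X Y : List String) :
    (if c then a :: X else a :: Y) = a :: (if c then X else Y) := by
  split_ifs <;> rfl

theorem pv_join_lt (a m : List Char) (R : List (List Char)) :
    (PySem.Chars.join ['\n'] (a :: R)).length < (PySem.Chars.join ['\n'] (a :: m :: R)).length := by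
  cases R with
  | nil =>
    simp [PySem.Chars.join_singleton, PySem.Chars.join_cons_cons, List.length_append]
  | cons r rs =>
    simp [PySem.Chars.join_cons_cons, List.length_append]

theorem pv_join_cons_ne (a m : String) (R : List String) :
    PySem.Str.join "\n" (a :: R) ≠ PySem.Str.join "\n" (a :: m :: R) := by
  intro h
  have h2 := congrArg String.toList h
  rw [PySem.Str.toList_join, PySem.Str.toList_join] at h2
  rw [show ("\n" : String).toList = ['\n'] from rfl] at h2
  simp only [List.map_cons] at h2
  have h3 := congrArg List.length h2
  exact absurd h3 (Nat.ne_of_lt (pv_join_lt _ _ _))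

-- ===== VERDICT (by name: the statement is the Claim_ definition above) =====
theorem build_brand_links_from_sitemap_py_spec : Claim_unchanged_build_brand_links_from_sitemap_py := by
  intro sc _hDom hND
  unfold build_brand_links_from_sitemap_py build_brand_links_from_sitemap_py_alt
  match sc with
  | none => rfl
  | some l =>
    simp only
    by_cases hg : (l.isEmpty || !(PySem.Dict.ofList l).contains "internal_links") = true
    · rw [if_pos hg, if_pos hg]
    · rw [if_neg hg, if_neg hg]
      simp only [Bool.or_eq_true, Bool.not_eq_true', not_or] at hg
      have hcontains : (PySem.Dict.ofList l).contains "internal_links" = true := by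
        cases h : (PySem.Dict.ofList l).contains "internal_links"
        · exact absurd h hg.2
        · rfl
      set links := PySem.Dict.ofList ((PySem.Dict.ofList l).getD "internal_links" []) with hlinks
      have hnd : (links.items.map Prod.fst).Nodup := PySem.Dict.nodup_keys_ofList _
      have hany : (links.items.map Prod.snd).any
          (fun u => PySem.Str.isIn "brand methodology" (PySem.Str.lower u)) = false := by
        unfold D_build_brand_links_from_sitemap_py at hND
        simp only [Option.getD_some] at hND
        cases h : (links.items.map Prod.snd).any
            (fun u => PySem.Str.isIn "brand methodology" (PySem.Str.lower u))
        · rfl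
        · exact absurd ⟨hcontains, h⟩ hND
      have hmeth : (links.items.foldl pvStep pvInit).meth = none := by
        rw [pvFold_meth]
        exact pvFoldM_none links.items hany
      have hb0 : (links.items.foldl pvStep pvInit).b0 = pvChain pvC0 0 links.items := by
        show pvGetSlot (links.items.foldl pvStep pvInit) 0 = _
        rw [pvFold_slot _ _ 0 (by omega)]
        exact pvSel_eq_chain 0 pvC0 pvHit0 links.items hnd
      have hb1 : (links.items.foldl pvStep pvInit).b1 = pvChain pvC1 0 links.items := by
        show pvGetSlot (links.items.foldl pvStep pvInit) 1 = _
        rw [pvFold_slot _ _ 1 (by omega)]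
        exact pvSel_eq_chain 1 pvC1 pvHit1 links.items hnd
      have hb2 : (links.items.foldl pvStep pvInit).b2 = pvChain pvC2 0 links.items := by
        show pvGetSlot (links.items.foldl pvStep pvInit) 2 = _
        rw [pvFold_slot _ _ 2 (by omega)]
        exact pvSel_eq_chain 2 pvC2 pvHit2 links.items hnd
      have hb3 : (links.items.foldl pvStep pvInit).b3 = pvChain pvC3 0 links.items := by
        show pvGetSlot (links.items.foldl pvStep pvInit) 3 = _
        rw [pvFold_slot _ _ 3 (by omega)]
        exact pvSel_eq_chain 3 pvC3 pvHit3 links.items hnd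
      have hb4 : (links.items.foldl pvStep pvInit).b4 = pvChain pvC4 0 links.items := by
        show pvGetSlot (links.items.foldl pvStep pvInit) 4 = _
        rw [pvFold_slot _ _ 4 (by omega)]
        exact pvSel_eq_chain 4 pvC4 pvHit4 links.items hnd
      rw [pvA_meth_none]
      simp only [pvTable, List.foldl, pvGetSlot, hmeth, hb0, hb1, hb2, hb3, hb4,
        pvC0, pvC1, pvC2, pvC3, pvC4, List.append_nil, String.reduceAppend]
      rw [pvChain3_val, pvChain3_lines, pvChain2_lines, pvChain2_lines, pvChain2_lines]
      simp only [pvGetD_eq_pvLk, pv_append_ite_nil]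

theorem build_brand_links_from_sitemap_py_changed : Claim_changed_build_brand_links_from_sitemap_py := by
  unfold Claim_changed_build_brand_links_from_sitemap_py; decide

theorem build_brand_links_from_sitemap_py_tight : Claim_exact_build_brand_links_from_sitemap_py := by
  intro sc _hDom hD
  match sc with
  | none => exact absurd hD (by decide)
  | some l =>
    unfold D_build_brand_links_from_sitemap_py at hD
    simp only [Option.getD_some] at hD
    obtain ⟨hc, hany⟩ := hD
    unfold build_brand_links_from_sitemap_py build_brand_links_from_sitemap_py_alt
    simp only
    have hgp : ¬ ((l.isEmpty || !(PySem.Dict.ofList l).contains "internal_links") = true) := by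
      cases l with
      | nil => exact absurd hc (by decide)
      | cons p t => simp [hc, List.isEmpty]
    rw [if_neg hgp, if_neg hgp]
    set links := PySem.Dict.ofList ((PySem.Dict.ofList l).getD "internal_links" []) with hlinks
    have hnd : (links.items.map Prod.fst).Nodup := PySem.Dict.nodup_keys_ofList _
    obtain ⟨u, hu⟩ := pvFoldM_some links.items hany
    have hmeth : (links.items.foldl pvStep pvInit).meth = some u := by
      rw [pvFold_meth]; exact hu
    have hb0 : (links.items.foldl pvStep pvInit).b0 = pvChain pvC0 0 links.items := by
      show pvGetSlot (links.items.foldl pvStep pvInit) 0 = _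
      rw [pvFold_slot _ _ 0 (by omega)]
      exact pvSel_eq_chain 0 pvC0 pvHit0 links.items hnd
    have hb1 : (links.items.foldl pvStep pvInit).b1 = pvChain pvC1 0 links.items := by
      show pvGetSlot (links.items.foldl pvStep pvInit) 1 = _
      rw [pvFold_slot _ _ 1 (by omega)]
      exact pvSel_eq_chain 1 pvC1 pvHit1 links.items hnd
    have hb2 : (links.items.foldl pvStep pvInit).b2 = pvChain pvC2 0 links.items := by
      show pvGetSlot (links.items.foldl pvStep pvInit) 2 = _
      rw [pvFold_slot _ _ 2 (by omega)]
      exact pvSel_eq_chain 2 pvC2 pvHit2 links.items hnd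
    have hb3 : (links.items.foldl pvStep pvInit).b3 = pvChain pvC3 0 links.items := by
      show pvGetSlot (links.items.foldl pvStep pvInit) 3 = _
      rw [pvFold_slot _ _ 3 (by omega)]
      exact pvSel_eq_chain 3 pvC3 pvHit3 links.items hnd
    have hb4 : (links.items.foldl pvStep pvInit).b4 = pvChain pvC4 0 links.items := by
      show pvGetSlot (links.items.foldl pvStep pvInit) 4 = _
      rw [pvFold_slot _ _ 4 (by omega)]
      exact pvSel_eq_chain 4 pvC4 pvHit4 links.items hnd
    rw [pvA_meth_none]
    simp only [pvTable, List.foldl, pvGetSlot, hmeth, hb0, hb1, hb2, hb3, hb4,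
      pvC0, pvC1, pvC2, pvC3, pvC4, String.reduceAppend]
    rw [pvChain3_val, pvChain3_lines, pvChain2_lines, pvChain2_lines, pvChain2_lines]
    simp only [pvGetD_eq_pvLk, pv_append_ite_nil,
      List.cons_append, List.nil_append, pv_ite_cons]
    exact pv_join_cons_ne _ _ _
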